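-- pv_equiv track=rewrite | github.com/JOSUEPORTALES/Redes-Neuronales-Python | 01 Enfoque_A_Grafos/0018 Búsqueda de Vuelta Atrás.py | busqueda_vuelta_atras
-- ===== SOURCE A (Python) =====
-- def busqueda_vuelta_atras(grafo, nodo_inicio, nodo_objetivo, camino=[]):
--     """
--     Función que implementa la búsqueda de vuelta atrás en un grafo.
--     :param grafo: Diccionario que representa el grafo.
--     :param nodo_inicio: Nodo desde donde comenzamos la búsqueda.
--     :param nodo_objetivo: Nodo que queremos encontrar.
--     :param camino: Lista que almacena el camino actual.
--     :return: Lista con el camino encontrado o None si no hay solución.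
--     """
--     camino = camino + [nodo_inicio]  # Agregamos el nodo actual al camino
--     if nodo_inicio == nodo_objetivo:  # Si encontramos el nodo objetivo, devolvemos el camino
--         return camino
--     if nodo_inicio not in grafo:  # Si el nodo no tiene conexiones, devolvemos None
--         return None
--     for vecino in grafo[nodo_inicio]:  # Iteramos sobre los nodos vecinos
--         if vecino not in camino:  # Evitamos ciclos revisando si el vecino ya está en el camino
--             nuevo_camino = busqueda_vuelta_atras(grafo, vecino, nodo_objetivo, camino)
--             if nuevo_camino:  # Si encontramos un camino válido, lo devolvemos
--                 return nuevo_camino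
--     return None  # Si no encontramos solución, devolvemos None
-- ===== SOURCE B (Python) =====
-- def busqueda_vuelta_atras(grafo, nodo_inicio, nodo_objetivo, camino=[]):
--     """Iterative DFS with an explicit stack of (node, path) frames instead of recursion."""
--     stack = [(nodo_inicio, camino + [nodo_inicio])]
--     while stack:
--         nodo, ruta = stack.pop()
--         if nodo == nodo_objetivo:
--             return ruta
--         if nodo in grafo:
--             for vecino in reversed(grafo[nodo]):
--                 if vecino not in ruta:
--                     stack.append((vecino, ruta + [vecino]))
--     return None
-- ===== Notes on version B (the rewrite author's own statement) =====
-- stated objective: alternative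
-- what changed: Replaces the recursive backtracking with an iterative DFS over an explicit stack of (node, path) frames, pushing neighbours in reversed order so the same first path is found.
import Mathlib
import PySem

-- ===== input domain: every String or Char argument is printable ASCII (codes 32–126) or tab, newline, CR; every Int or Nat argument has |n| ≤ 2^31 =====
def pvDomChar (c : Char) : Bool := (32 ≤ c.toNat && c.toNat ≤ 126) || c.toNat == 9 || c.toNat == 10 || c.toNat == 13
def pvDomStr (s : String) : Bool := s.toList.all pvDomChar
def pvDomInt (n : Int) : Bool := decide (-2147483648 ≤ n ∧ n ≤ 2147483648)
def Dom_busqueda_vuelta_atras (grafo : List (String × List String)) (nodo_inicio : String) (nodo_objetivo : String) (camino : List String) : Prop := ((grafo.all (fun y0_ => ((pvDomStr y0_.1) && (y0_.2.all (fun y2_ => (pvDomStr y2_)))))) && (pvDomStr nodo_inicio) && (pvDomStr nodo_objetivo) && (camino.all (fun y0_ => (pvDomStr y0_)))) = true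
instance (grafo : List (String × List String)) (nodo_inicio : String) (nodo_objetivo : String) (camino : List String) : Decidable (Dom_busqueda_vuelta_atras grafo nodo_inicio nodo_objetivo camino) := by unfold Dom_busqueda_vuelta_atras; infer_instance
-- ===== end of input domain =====

-- B replaces the recursive backtracking by an explicit stack of (node, path) frames (different decomposition; same return values).

-- dict lookup on the association-list representation of grafo (first match; Python dict keys are unique);
-- 'nodo in grafo' is 'pvLook grafo nodo ≠ none'. Exact on the stated domain. Used by both ports.
def pvLook : List (String × List String) → String → Option (List String)
  | [], _ => none
  | (k, v) :: rest, n => if k = n then some v else pvLook rest n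

-- values appearing in the neighbour lists (termination measure support)
def pvVals (grafo : List (String × List String)) : List String := grafo.flatMap Prod.snd

-- number of graph values not yet on the path
def pvM (grafo : List (String × List String)) (p : List String) : Nat :=
  ((pvVals grafo).filter (fun v => decide (v ∉ p))).length

theorem pvFilter_le {α : Type} (l : List α) (p q : α → Bool) (himp : ∀ x, q x = true → p x = true) :
    (l.filter q).length ≤ (l.filter p).length := by
  induction l with
  | nil => simp
  | cons y ys ihy =>
    by_cases hqy : q y = true
    · have := himp y hqy; simp [List.filter, hqy, this]; omega
    · have hqy' : q y = false := by simpa using hqy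
      by_cases hpy : p y = true
      · simp [List.filter, hqy', hpy]; omega
      · have hpy' : p y = false := by simpa using hpy
        simp [List.filter, hqy', hpy']; omega

theorem pvFilter_lt {α : Type} (l : List α) (p q : α → Bool) (himp : ∀ x, q x = true → p x = true)
    (v : α) (hv : v ∈ l) (hpv : p v = true) (hqv : q v = false) :
    (l.filter q).length < (l.filter p).length := by
  induction l with
  | nil => cases hv
  | cons x xs ih =>
    by_cases hqx : q x = true
    · have hpx := himp x hqx
      simp only [List.filter, hqx, hpx, List.length_cons]
      rcases List.mem_cons.mp hv with h | h
      · subst h; rw [hqx] at hqv; cases hqv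
      · exact Nat.succ_lt_succ (ih h)
    · have hqx' : q x = false := by simpa using hqx
      have hle := pvFilter_le xs p q himp
      by_cases hpx : p x = true
      · simp only [List.filter, hqx', hpx, List.length_cons]; omega
      · have hpx' : p x = false := by simpa using hpx
        rcases List.mem_cons.mp hv with h | h
        · subst h; rw [hpv] at hpx'; cases hpx'
        · simp only [List.filter, hqx', hpx']; exact ih h

theorem pvM_lt (grafo : List (String × List String)) (p : List String) (v : String)
    (hv : v ∈ pvVals grafo) (hnp : v ∉ p) : pvM grafo (p ++ [v]) < pvM grafo p := by
  apply pvFilter_lt (pvVals grafo)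
    (fun x => decide (x ∉ p)) (fun x => decide (x ∉ p ++ [v]))
    (fun x hx => by simp only [decide_eq_true_eq, List.mem_append, List.mem_singleton] at hx ⊢; tauto)
    v hv
  · simpa using hnp
  · simp

theorem pvLook_mem (grafo : List (String × List String)) (n : String) (l : List String)
    (h : pvLook grafo n = some l) : ∀ v ∈ l, v ∈ pvVals grafo := by
  induction grafo with
  | nil => simp [pvLook] at h
  | cons g gs ih =>
    obtain ⟨a, b⟩ := g
    by_cases he : a = n
    · rw [pvLook, if_pos he] at h
      injection h with h; subst h
      intro v hv; simp [pvVals, List.flatMap]; exact Or.inl hv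
    · rw [pvLook, if_neg he] at h
      intro v hv
      have := ih h v hv
      simp only [pvVals, List.flatMap_cons, List.mem_append]
      exact Or.inr (by simpa [pvVals, List.flatMap] using this)

theorem pvLook_len (grafo : List (String × List String)) (n : String) (l : List String)
    (h : pvLook grafo n = some l) : l.length ≤ (pvVals grafo).length := by
  induction grafo with
  | nil => simp [pvLook] at h
  | cons g gs ih =>
    obtain ⟨a, b⟩ := g
    by_cases he : a = n
    · rw [pvLook, if_pos he] at h
      injection h with h; subst h
      simp [pvVals, List.flatMap]
    · rw [pvLook, if_neg he] at h
      have := ih h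
      simp only [pvVals, List.flatMap_cons, List.length_append] at *
      omega

-- ===== PORT A =====
-- A's recursion, with 'camino = camino + [nodo_inicio]' hoisted to the call sites
-- (goA receives the path already containing its node; the same values are computed), for a structural termination measure.
mutual
def goA (grafo : List (String × List String)) (objetivo : String) (camino : List String) (nodo : String) : Option (List String) :=
  if nodo = objetivo then some camino               -- if nodo_inicio == nodo_objetivo: return camino
  else match h : pvLook grafo nodo with             -- if nodo_inicio not in grafo: return None
  | none => none
  | some vecinos =>                                 -- for vecino in grafo[nodo_inicio]: ...
    loopA grafo objetivo camino vecinos (pvLook_len grafo nodo vecinos h) (pvLook_mem grafo nodo vecinos h)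
termination_by (pvM grafo camino, (pvVals grafo).length + 1)
decreasing_by
  apply Prod.Lex.right; have := pvLook_len grafo nodo vecinos h; omega

def loopA (grafo : List (String × List String)) (objetivo : String) (camino : List String) (vecinos : List String)
    (hlen : vecinos.length ≤ (pvVals grafo).length) (hmem : ∀ v ∈ vecinos, v ∈ pvVals grafo) : Option (List String) :=
  match h' : vecinos with
  | [] => none                                      -- loop exhausted: return None
  | v :: vs =>
    if hv : v ∈ camino then                         -- if vecino not in camino (else skip)
      loopA grafo objetivo camino vs (by simp at hlen; omega)
        (fun x hx => hmem x (List.mem_cons_of_mem _ hx))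
    else match goA grafo objetivo (camino ++ [v]) v with   -- nuevo_camino = busqueda_vuelta_atras(grafo, vecino, nodo_objetivo, camino)
    | some c =>                                     -- 'if nuevo_camino:' — Python truthiness: an empty list is falsy
      if c = [] then
        loopA grafo objetivo camino vs (by simp at hlen; omega)
          (fun x hx => hmem x (List.mem_cons_of_mem _ hx))
      else some c
    | none =>
      loopA grafo objetivo camino vs (by simp at hlen; omega)
        (fun x hx => hmem x (List.mem_cons_of_mem _ hx))
termination_by (pvM grafo camino, vecinos.length)
decreasing_by
  all_goals first
    | (apply Prod.Lex.left;
       exact pvM_lt grafo camino v (hmem v (List.mem_cons_self ..)) hv)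
    | (apply Prod.Lex.right; simp)
end

def busqueda_vuelta_atras (grafo : List (String × List String)) (nodo_inicio : String) (nodo_objetivo : String) (camino : List String) : Option (List String) :=
  goA grafo nodo_objetivo (camino ++ [nodo_inicio]) nodo_inicio

-- ===== PORT B =====
-- weight of a stack of (node, path) frames, for termination of the while loop
def pvW (grafo : List (String × List String)) (stack : List (String × List String)) : Nat :=
  (stack.map (fun f => ((pvVals grafo).length + 1) ^ pvM grafo f.2)).sum

-- 'for vecino in reversed(grafo[nodo]): if vecino not in ruta: stack.append(...)' — head of the list is the top of the stack
def pvPush (ruta : List String) (vecinos : List String) (rest : List (String × List String)) : List (String × List String) :=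
  vecinos.reverse.foldl (fun st v => if v ∈ ruta then st else (v, ruta ++ [v]) :: st) rest

theorem pvPush_eq (ruta : List String) (vecinos : List String) (rest : List (String × List String)) :
    pvPush ruta vecinos rest
      = ((vecinos.filter (fun v => decide (v ∉ ruta))).map (fun v => (v, ruta ++ [v]))) ++ rest := by
  induction vecinos with
  | nil => simp [pvPush]
  | cons x xs ih =>
    simp only [pvPush, List.reverse_cons, List.foldl_append, List.foldl_cons, List.foldl_nil] at *
    rw [ih]
    by_cases hx : x ∈ ruta <;> simp [List.filter, hx]

theorem pvW_push_lt (grafo : List (String × List String)) (nodo : String) (ruta : List String)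
    (rest : List (String × List String)) (vecinos : List String)
    (h : pvLook grafo nodo = some vecinos) :
    pvW grafo (pvPush ruta vecinos rest) < pvW grafo ((nodo, ruta) :: rest) := by
  rw [pvPush_eq]
  have hN : 0 < (pvVals grafo).length + 1 := Nat.succ_pos _
  cases hm : pvM grafo ruta with
  | zero =>
    have hnil : vecinos.filter (fun v => decide (v ∉ ruta)) = [] := by
      by_contra hne
      rcases List.exists_mem_of_ne_nil _ hne with ⟨v, hv⟩
      have h1 := List.of_mem_filter hv
      have hvm := List.mem_of_mem_filter hv
      have := pvM_lt grafo ruta v (pvLook_mem grafo nodo vecinos h v hvm) (by simpa using h1)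
      omega
    rw [hnil]
    simp only [List.map_nil, List.nil_append, pvW, List.map_cons, List.sum_cons, hm, pow_zero]
    omega
  | succ m =>
    have hstep : ∀ x ∈ (vecinos.filter (fun v => decide (v ∉ ruta))).map
        (fun f => ((pvVals grafo).length + 1) ^ pvM grafo (ruta ++ [f])),
        x ≤ ((pvVals grafo).length + 1) ^ m := by
      intro x hx
      rcases List.mem_map.mp hx with ⟨v, hv, rfl⟩
      have h1 := pvM_lt grafo ruta v
        (pvLook_mem grafo nodo vecinos h v (List.mem_of_mem_filter hv))
        (by simpa using List.of_mem_filter hv)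
      exact Nat.pow_le_pow_right hN (by omega)
    have hsum := List.sum_le_card_nsmul _ _ hstep
    simp only [smul_eq_mul, List.length_map] at hsum
    have hlen : (vecinos.filter (fun v => decide (v ∉ ruta))).length ≤ (pvVals grafo).length :=
      le_trans (List.length_filter_le _ _) (pvLook_len grafo nodo vecinos h)
    have hpow : 1 ≤ ((pvVals grafo).length + 1) ^ m := Nat.one_le_pow _ _ hN
    have hkey : ((vecinos.filter (fun v => decide (v ∉ ruta))).map
        (fun f => ((pvVals grafo).length + 1) ^ pvM grafo (ruta ++ [f]))).sum
        < ((pvVals grafo).length + 1) ^ (m + 1) := by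
      have h2 : ((pvVals grafo).length + 1) ^ (m + 1)
          = ((pvVals grafo).length + 1) * ((pvVals grafo).length + 1) ^ m := by ring
      have h3 : (vecinos.filter (fun v => decide (v ∉ ruta))).length * ((pvVals grafo).length + 1) ^ m
          ≤ (pvVals grafo).length * ((pvVals grafo).length + 1) ^ m :=
        Nat.mul_le_mul_right _ hlen
      nlinarith
    have hmap : ((vecinos.filter (fun v => decide (v ∉ ruta))).map (fun v => (v, ruta ++ [v]))).map
        (fun f => ((pvVals grafo).length + 1) ^ pvM grafo f.2)
        = (vecinos.filter (fun v => decide (v ∉ ruta))).map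
        (fun f => ((pvVals grafo).length + 1) ^ pvM grafo (ruta ++ [f])) := by
      rw [List.map_map]; rfl
    simp only [pvW, List.map_append, List.sum_append, List.map_cons, List.sum_cons, hm, hmap]
    omega

def runB (grafo : List (String × List String)) (objetivo : String) (stack : List (String × List String)) : Option (List String) :=
  match stack with
  | [] => none                                      -- while stack empties: return None
  | (nodo, ruta) :: rest =>                         -- nodo, ruta = stack.pop()
    if nodo = objetivo then some ruta               -- if nodo == nodo_objetivo: return ruta
    else match h : pvLook grafo nodo with           -- if nodo in grafo
    | none => runB grafo objetivo rest
    | some vecinos => runB grafo objetivo (pvPush ruta vecinos rest)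
termination_by pvW grafo stack
decreasing_by
  · simp only [pvW, List.map_cons, List.sum_cons]
    have : 1 ≤ ((pvVals grafo).length + 1) ^ pvM grafo ruta := Nat.one_le_pow _ _ (Nat.succ_pos _)
    omega
  · exact pvW_push_lt grafo nodo ruta rest vecinos h

def busqueda_vuelta_atras_alt (grafo : List (String × List String)) (nodo_inicio : String) (nodo_objetivo : String) (camino : List String) : Option (List String) :=
  runB grafo nodo_objetivo [(nodo_inicio, camino ++ [nodo_inicio])]

-- ===== PRECONDITION & SPEC =====
def Spec_busqueda_vuelta_atras (grafo : List (String × List String)) (nodo_inicio : String) (nodo_objetivo : String) (camino : List String) (out : Option (List String)) : Prop := out = busqueda_vuelta_atras_alt grafo nodo_inicio nodo_objetivo camino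
instance (grafo : List (String × List String)) (nodo_inicio : String) (nodo_objetivo : String) (camino : List String) (out : Option (List String)) : Decidable (Spec_busqueda_vuelta_atras grafo nodo_inicio nodo_objetivo camino out) := by unfold Spec_busqueda_vuelta_atras; infer_instance

-- ===== CLAIM (what is proved, stated in full; the proofs are below) =====
def Claim_equal_busqueda_vuelta_atras : Prop := ∀ (grafo : List (String × List String)) (nodo_inicio : String) (nodo_objetivo : String) (camino : List String), Dom_busqueda_vuelta_atras grafo nodo_inicio nodo_objetivo camino → Spec_busqueda_vuelta_atras grafo nodo_inicio nodo_objetivo camino (busqueda_vuelta_atras grafo nodo_inicio nodo_objetivo camino)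

-- ===== LEMMAS AND PROOFS =====

-- "first result" of running goA over a list of frames
def pvFS (grafo : List (String × List String)) (objetivo : String) (stack : List (String × List String)) : Option (List String) :=
  match stack with
  | [] => none
  | (n, p) :: t => (goA grafo objetivo p n).orElse (fun _ => pvFS grafo objetivo t)

theorem loopA_nil (grafo : List (String × List String)) (objetivo : String) (camino : List String)
    (h1 : ([] : List String).length ≤ (pvVals grafo).length) (h2 : ∀ x ∈ ([] : List String), x ∈ pvVals grafo) :
    loopA grafo objetivo camino [] h1 h2 = none := by
  conv_lhs => rw [loopA.eq_def]

theorem loopA_skip (grafo : List (String × List String)) (objetivo : String) (camino : List String)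
    (v : String) (vs : List String) (hlen : (v::vs).length ≤ (pvVals grafo).length)
    (hmem : ∀ x ∈ v::vs, x ∈ pvVals grafo) (hv : v ∈ camino) :
    loopA grafo objetivo camino (v::vs) hlen hmem
      = loopA grafo objetivo camino vs (by simp at hlen; omega) (fun x hx => hmem x (List.mem_cons_of_mem _ hx)) := by
  conv_lhs => rw [loopA.eq_def]
  simp only [dif_pos hv]

theorem loopA_some (grafo : List (String × List String)) (objetivo : String) (camino : List String)
    (v : String) (vs : List String) (hlen : (v::vs).length ≤ (pvVals grafo).length)
    (hmem : ∀ x ∈ v::vs, x ∈ pvVals grafo) (hv : v ∉ camino) (c : List String)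
    (hg : goA grafo objetivo (camino ++ [v]) v = some c) :
    loopA grafo objetivo camino (v::vs) hlen hmem
      = if c = [] then loopA grafo objetivo camino vs (by simp at hlen; omega) (fun x hx => hmem x (List.mem_cons_of_mem _ hx)) else some c := by
  conv_lhs => rw [loopA.eq_def]
  simp only [dif_neg hv, hg]

theorem loopA_none (grafo : List (String × List String)) (objetivo : String) (camino : List String)
    (v : String) (vs : List String) (hlen : (v::vs).length ≤ (pvVals grafo).length)
    (hmem : ∀ x ∈ v::vs, x ∈ pvVals grafo) (hv : v ∉ camino)
    (hg : goA grafo objetivo (camino ++ [v]) v = none) :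
    loopA grafo objetivo camino (v::vs) hlen hmem
      = loopA grafo objetivo camino vs (by simp at hlen; omega) (fun x hx => hmem x (List.mem_cons_of_mem _ hx)) := by
  conv_lhs => rw [loopA.eq_def]
  simp only [dif_neg hv, hg]

theorem goA_obj (grafo : List (String × List String)) (objetivo : String) (camino : List String)
    (nodo : String) (h : nodo = objetivo) : goA grafo objetivo camino nodo = some camino := by
  conv_lhs => rw [goA.eq_def]
  simp only [if_pos h]

theorem goA_nolook (grafo : List (String × List String)) (objetivo : String) (camino : List String) (nodo : String)
    (hobj : ¬ nodo = objetivo) (h : pvLook grafo nodo = none) :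
    goA grafo objetivo camino nodo = none := by
  conv_lhs => rw [goA.eq_def]
  rw [if_neg hobj]
  split
  · rfl
  · rename_i v2 h2; rw [h] at h2; simp at h2

theorem goA_look (grafo : List (String × List String)) (objetivo : String) (camino : List String) (nodo : String)
    (vecinos : List String) (hobj : ¬ nodo = objetivo) (h : pvLook grafo nodo = some vecinos) :
    goA grafo objetivo camino nodo
      = loopA grafo objetivo camino vecinos (pvLook_len grafo nodo vecinos h) (pvLook_mem grafo nodo vecinos h) := by
  conv_lhs => rw [goA.eq_def]
  rw [if_neg hobj]
  split
  · rename_i h2; rw [h] at h2; simp at h2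
  · rename_i v2 h2
    rw [h] at h2; injection h2 with h2; subst h2; rfl


theorem loopA_ne_nil (grafo : List (String × List String)) (objetivo : String) (camino : List String) :
    ∀ (vecinos : List String) (hlen : vecinos.length ≤ (pvVals grafo).length)
      (hmem : ∀ v ∈ vecinos, v ∈ pvVals grafo),
      loopA grafo objetivo camino vecinos hlen hmem ≠ some [] := by
  intro vecinos
  induction vecinos with
  | nil => intro hlen hmem; rw [loopA_nil]; simp
  | cons v vs ih =>
    intro hlen hmem
    by_cases hv : v ∈ camino
    · rw [loopA_skip _ _ _ _ _ _ _ hv]; exact ih _ _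
    · cases hg : goA grafo objetivo (camino ++ [v]) v with
      | none => rw [loopA_none _ _ _ _ _ _ _ hv hg]; exact ih _ _
      | some c =>
        rw [loopA_some _ _ _ _ _ _ _ hv c hg]
        by_cases hc : c = []
        · rw [if_pos hc]; exact ih _ _
        · rw [if_neg hc]; intro h2; injection h2 with h2; exact hc h2

theorem goA_ne_nil (grafo : List (String × List String)) (objetivo : String) (camino : List String) (nodo : String)
    (hne : camino ≠ []) : goA grafo objetivo camino nodo ≠ some [] := by
  by_cases hobj : nodo = objetivo
  · rw [goA_obj _ _ _ _ hobj]; intro h2; injection h2 with h2; exact hne h2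
  · cases h : pvLook grafo nodo with
    | none => rw [goA_nolook _ _ _ _ hobj h]; simp
    | some vecinos => rw [goA_look _ _ _ _ _ hobj h]; exact loopA_ne_nil _ _ _ _ _ _

theorem loopA_eq_FS (grafo : List (String × List String)) (objetivo : String) (camino : List String) :
    ∀ (vecinos : List String) (hlen : vecinos.length ≤ (pvVals grafo).length)
      (hmem : ∀ v ∈ vecinos, v ∈ pvVals grafo),
      loopA grafo objetivo camino vecinos hlen hmem
        = pvFS grafo objetivo ((vecinos.filter (fun v => decide (v ∉ camino))).map (fun v => (v, camino ++ [v]))) := by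
  intro vecinos
  induction vecinos with
  | nil => intro hlen hmem; rw [loopA_nil]; simp [pvFS]
  | cons v vs ih =>
    intro hlen hmem
    by_cases hv : v ∈ camino
    · rw [loopA_skip _ _ _ _ _ _ _ hv, ih]
      simp [hv]
    · have hfil : (v :: vs).filter (fun v => decide (v ∉ camino))
          = v :: vs.filter (fun v => decide (v ∉ camino)) := by simp [hv]
      rw [hfil]
      simp only [List.map_cons, pvFS]
      cases hg : goA grafo objetivo (camino ++ [v]) v with
      | none => rw [loopA_none _ _ _ _ _ _ _ hv hg, ih]; simp [Option.orElse]
      | some c =>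
        have hcne : c ≠ [] := fun h => goA_ne_nil grafo objetivo (camino ++ [v]) v (by simp) (h ▸ hg)
        rw [loopA_some _ _ _ _ _ _ _ hv c hg, if_neg hcne]
        simp [Option.orElse]

theorem FS_append (grafo : List (String × List String)) (objetivo : String) (a b : List (String × List String)) :
    pvFS grafo objetivo (a ++ b) = (pvFS grafo objetivo a).orElse (fun _ => pvFS grafo objetivo b) := by
  induction a with
  | nil => simp [pvFS]
  | cons f t ih =>
    obtain ⟨n, p⟩ := f
    simp only [List.cons_append, pvFS, ih]
    cases goA grafo objetivo p n <;> simp [Option.orElse]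

theorem runB_eq_FS (grafo : List (String × List String)) (objetivo : String) (stack : List (String × List String)) :
    runB grafo objetivo stack = pvFS grafo objetivo stack := by
  induction stack using runB.induct grafo objetivo with
  | case1 => rw [runB.eq_def]; simp [pvFS]
  | case2 ruta rest =>
    have hg : goA grafo objetivo ruta objetivo = some ruta := goA_obj _ _ _ _ rfl
    rw [runB.eq_def]
    simp [pvFS, hg, Option.orElse]
  | case3 nodo ruta rest hobj h ih =>
    rw [runB.eq_def]
    simp only [if_neg hobj]
    split
    · rw [ih]
      simp only [pvFS]
      rw [goA_nolook _ _ ruta _ hobj h]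
      cases pvFS grafo objetivo rest <;> simp [Option.orElse]
    · rename_i v2 h2; rw [h] at h2; simp at h2
  | case4 nodo ruta rest hobj vecinos h ih =>
    rw [runB.eq_def]
    simp only [if_neg hobj]
    split
    · rename_i h2; rw [h] at h2; simp at h2
    · rename_i v2 h2
      rw [h] at h2; injection h2 with h2; subst h2
      rw [ih, pvPush_eq, FS_append]
      simp only [pvFS]
      rw [goA_look _ _ _ _ _ hobj h, loopA_eq_FS]

-- ===== VERDICT (by name: the statement is the Claim_ definition above) =====
theorem busqueda_vuelta_atras_spec : Claim_equal_busqueda_vuelta_atras := by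
  intro grafo nodo_inicio nodo_objetivo camino _
  unfold Spec_busqueda_vuelta_atras busqueda_vuelta_atras busqueda_vuelta_atras_alt
  rw [runB_eq_FS]
  simp only [pvFS]
  cases goA grafo nodo_objetivo (camino ++ [nodo_inicio]) nodo_inicio <;> simp [Option.orElse]
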